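-- pv_equiv track=rewrite | github.com/KingHyoman/CodingTest | Programmers/babypro_1.py | solution
-- ===== SOURCE A (Python) =====
-- def solution(babbling):
--     answer = 0
--     for bab in babbling:
--         stack = ''
--         past = ''
--         for i in bab:
--             stack += i
--             if stack == 'aya' or stack == 'ye' or stack == 'woo' or stack == 'ma':
--                 if past == stack:
--                     pass
--                 else:
--                     past = stack
--                     stack = ''
--
--         if not stack:
--             answer += 1
--
--     return answer
-- ===== SOURCE B (Python) =====
-- def solution(babbling):
--     def ok(s, prev=''):
--         if not s:
--             return True
--         if prev != 'aya' and s.startswith('aya'):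
--             return ok(s[3:], 'aya')
--         if prev != 'ye' and s.startswith('ye'):
--             return ok(s[2:], 'ye')
--         if prev != 'woo' and s.startswith('woo'):
--             return ok(s[3:], 'woo')
--         if prev != 'ma' and s.startswith('ma'):
--             return ok(s[2:], 'ma')
--         return False
--     return sum(ok(b) for b in babbling)
-- ===== Notes on version B (the rewrite author's own statement) =====
-- stated objective: idiomatic
-- what changed: A's char-by-char stack accumulator with a 'past' repeat check is replaced by a recursive word-by-word tokenizer that consumes one of the four fragments from the front (skipping the previously consumed one) and counts via sum().
import Mathlib
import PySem

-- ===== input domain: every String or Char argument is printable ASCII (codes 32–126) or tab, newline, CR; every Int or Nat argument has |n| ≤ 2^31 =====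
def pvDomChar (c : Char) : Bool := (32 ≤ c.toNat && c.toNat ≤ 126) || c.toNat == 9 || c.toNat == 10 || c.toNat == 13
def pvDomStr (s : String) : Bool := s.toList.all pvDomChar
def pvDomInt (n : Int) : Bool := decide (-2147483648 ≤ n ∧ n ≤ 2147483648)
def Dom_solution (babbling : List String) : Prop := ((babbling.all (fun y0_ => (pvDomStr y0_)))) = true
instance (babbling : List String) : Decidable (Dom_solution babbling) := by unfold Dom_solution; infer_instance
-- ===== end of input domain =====

-- B replaces A's char-by-char stack/past matcher by a recursive word-by-word tokenizer (objective: idiomatic/alternative, same cost).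

-- ===== PORT A =====
-- A's inner loop: stack accumulates chars; on exact match of a word distinct from `past`, reset.
def aStep (sp : List Char × List Char) (c : Char) : List Char × List Char :=
  let stack := sp.1 ++ [c]
  if stack = ['a','y','a'] ∨ stack = ['y','e'] ∨ stack = ['w','o','o'] ∨ stack = ['m','a'] then
    if sp.2 = stack then (stack, sp.2) else ([], stack)
  else (stack, sp.2)

def solution (babbling : List String) : Int :=
  babbling.foldl
    (fun answer bab =>
      let sp := bab.toList.foldl aStep ([], [])
      if sp.1 = [] then answer + 1 else answer)
    0

-- ===== PORT B =====
-- B's helper ok(s, prev): recursive front matching of the four words, skipping prev.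
def bOk : List Char → List Char → Bool
  | [], _ => true
  | c :: s, prev =>
    if prev ≠ ['a','y','a'] ∧ List.isPrefixOf ['a','y','a'] (c :: s) then
      bOk ((c :: s).drop 3) ['a','y','a']
    else if prev ≠ ['y','e'] ∧ List.isPrefixOf ['y','e'] (c :: s) then
      bOk ((c :: s).drop 2) ['y','e']
    else if prev ≠ ['w','o','o'] ∧ List.isPrefixOf ['w','o','o'] (c :: s) then
      bOk ((c :: s).drop 3) ['w','o','o']
    else if prev ≠ ['m','a'] ∧ List.isPrefixOf ['m','a'] (c :: s) then
      bOk ((c :: s).drop 2) ['m','a']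
    else false
  termination_by s _ => s.length
  decreasing_by all_goals simp

def solution_alt (babbling : List String) : Int :=
  babbling.foldl (fun acc b => acc + (if bOk b.toList [] then 1 else 0)) 0

-- ===== PRECONDITION & SPEC =====
def Spec_solution (babbling : List String) (out : Int) : Prop := out = solution_alt babbling
instance (babbling : List String) (out : Int) : Decidable (Spec_solution babbling out) := by unfold Spec_solution; infer_instance

-- ===== CLAIM (what is proved, stated in full; the proofs are below) =====
def Claim_equal_solution : Prop := ∀ (babbling : List String), Dom_solution babbling → Spec_solution babbling (solution babbling)

-- ===== LEMMAS AND PROOFS =====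

-- once the stack is nonempty and is a prefix of no word, it can never reset
theorem deadLoop (s : List Char) : ∀ (stack past : List Char), stack ≠ [] →
    (¬ List.isPrefixOf stack ['a','y','a']) → (¬ List.isPrefixOf stack ['y','e']) →
    (¬ List.isPrefixOf stack ['w','o','o']) → (¬ List.isPrefixOf stack ['m','a']) →
    (s.foldl aStep (stack, past)).1 ≠ [] := by
  induction s with
  | nil => intro stack past h _ _ _ _; simpa using h
  | cons c s ih =>
    intro stack past hne h1 h2 h3 h4
    simp only [List.foldl_cons]
    have hword : ¬ (stack ++ [c] = ['a','y','a'] ∨ stack ++ [c] = ['y','e'] ∨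
        stack ++ [c] = ['w','o','o'] ∨ stack ++ [c] = ['m','a']) := by
      rintro (h|h|h|h)
      · exact h1 (List.isPrefixOf_iff_prefix.2 (h ▸ ⟨[c], rfl⟩))
      · exact h2 (List.isPrefixOf_iff_prefix.2 (h ▸ ⟨[c], rfl⟩))
      · exact h3 (List.isPrefixOf_iff_prefix.2 (h ▸ ⟨[c], rfl⟩))
      · exact h4 (List.isPrefixOf_iff_prefix.2 (h ▸ ⟨[c], rfl⟩))
    have hstep : aStep (stack, past) c = (stack ++ [c], past) := by
      unfold aStep; simp only [if_neg hword]
    rw [hstep]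
    exact ih (stack ++ [c]) past (by simp)
      (fun hp => h1 (List.isPrefixOf_iff_prefix.2
        ((List.prefix_append stack [c]).trans (List.isPrefixOf_iff_prefix.1 hp))))
      (fun hp => h2 (List.isPrefixOf_iff_prefix.2
        ((List.prefix_append stack [c]).trans (List.isPrefixOf_iff_prefix.1 hp))))
      (fun hp => h3 (List.isPrefixOf_iff_prefix.2
        ((List.prefix_append stack [c]).trans (List.isPrefixOf_iff_prefix.1 hp))))
      (fun hp => h4 (List.isPrefixOf_iff_prefix.2
        ((List.prefix_append stack [c]).trans (List.isPrefixOf_iff_prefix.1 hp))))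

-- once the stack holds a complete word (the repeated-word "pass" state), it never empties again
theorem wordStuck (s : List Char) (past w : List Char)
    (hw : w = ['a','y','a'] ∨ w = ['y','e'] ∨ w = ['w','o','o'] ∨ w = ['m','a']) :
    (s.foldl aStep (w, past)).1 ≠ [] := by
  cases s with
  | nil => rcases hw with h|h|h|h <;> simp [h]
  | cons c s =>
    simp only [List.foldl_cons]
    have hword : ¬ (w ++ [c] = ['a','y','a'] ∨ w ++ [c] = ['y','e'] ∨
        w ++ [c] = ['w','o','o'] ∨ w ++ [c] = ['m','a']) := by
      rcases hw with h|h|h|h <;> subst h <;> simp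
    have hstep : aStep (w, past) c = (w ++ [c], past) := by
      unfold aStep; simp only [if_neg hword]
    rw [hstep]
    apply deadLoop s (w ++ [c]) past (by simp) <;>
      rcases hw with h|h|h|h <;> subst h <;> simp [List.isPrefixOf]

theorem mainAux : ∀ (n : Nat) (s past : List Char), s.length ≤ n →
    (((s.foldl aStep ([], past)).1 = []) ↔ (bOk s past = true)) := by
  intro n
  induction n with
  | zero =>
    intro s past hlen
    have hs : s = [] := by cases s <;> simp_all
    subst hs; simp [bOk]
  | succ n ih =>
    intro s past hlen
    match s with
    | [] => simp [bOk]
    | [c1] =>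
      simp [bOk, aStep, List.isPrefixOf]
    | c1 :: c2 :: s2 =>
      simp only [List.foldl_cons]
      have h1 : aStep ([], past) c1 = ([c1], past) := by unfold aStep; simp
      rw [h1]
      have hlen2 : s2.length ≤ n := by simp at hlen; omega
      by_cases h1y : c1 = 'y'
      · subst h1y
        by_cases h2e : c2 = 'e'
        · subst h2e
          have h2 : aStep (['y'], past) 'e' =
              if past = ['y','e'] then (['y','e'], past) else ([], ['y','e']) := by
            unfold aStep; simp
          rw [h2]
          by_cases hp : past = ['y','e']
          · subst hp
            have hstuck := wordStuck s2 ['y','e'] ['y','e'] (by simp)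
            simp [bOk, List.isPrefixOf, hstuck]
          · rw [if_neg hp]
            have hIH := ih s2 ['y','e'] hlen2
            simp [bOk, List.isPrefixOf, hp, hIH]
        · have h2 : aStep (['y'], past) c2 = (['y', c2], past) := by
            unfold aStep; simp [h2e]
          rw [h2]
          have hdead := deadLoop s2 ['y', c2] past (by simp)
            (by simp [List.isPrefixOf]) (by simp [List.isPrefixOf, h2e])
            (by simp [List.isPrefixOf]) (by simp [List.isPrefixOf])
          simp [bOk, List.isPrefixOf, Ne.symm h2e, hdead]
      · by_cases h1m : c1 = 'm'
        · subst h1m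
          by_cases h2a : c2 = 'a'
          · subst h2a
            have h2 : aStep (['m'], past) 'a' =
                if past = ['m','a'] then (['m','a'], past) else ([], ['m','a']) := by
              unfold aStep; simp
            rw [h2]
            by_cases hp : past = ['m','a']
            · subst hp
              have hstuck := wordStuck s2 ['m','a'] ['m','a'] (by simp)
              simp [bOk, List.isPrefixOf, hstuck]
            · rw [if_neg hp]
              have hIH := ih s2 ['m','a'] hlen2
              simp [bOk, List.isPrefixOf, hp, hIH]
          · have h2 : aStep (['m'], past) c2 = (['m', c2], past) := by
              unfold aStep; simp [h2a]
            rw [h2]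
            have hdead := deadLoop s2 ['m', c2] past (by simp)
              (by simp [List.isPrefixOf]) (by simp [List.isPrefixOf])
              (by simp [List.isPrefixOf]) (by simp [List.isPrefixOf, h2a])
            simp [bOk, List.isPrefixOf, Ne.symm h2a, hdead]
        · by_cases h1a : c1 = 'a'
          · subst h1a
            by_cases h2y : c2 = 'y'
            · subst h2y
              have h2 : aStep (['a'], past) 'y' = (['a','y'], past) := by
                unfold aStep; simp
              rw [h2]
              match s2 with
              | [] => simp [bOk, List.isPrefixOf]
              | c3 :: s3 =>
                simp only [List.foldl_cons]
                have hlen3 : s3.length ≤ n := by simp at hlen; omega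
                by_cases h3a : c3 = 'a'
                · subst h3a
                  have h3 : aStep (['a','y'], past) 'a' =
                      if past = ['a','y','a'] then (['a','y','a'], past)
                      else ([], ['a','y','a']) := by
                    unfold aStep; simp
                  rw [h3]
                  by_cases hp : past = ['a','y','a']
                  · subst hp
                    have hstuck := wordStuck s3 ['a','y','a'] ['a','y','a'] (by simp)
                    simp [bOk, List.isPrefixOf, hstuck]
                  · rw [if_neg hp]
                    have hIH := ih s3 ['a','y','a'] hlen3
                    simp [bOk, List.isPrefixOf, hp, hIH]
                · have h3 : aStep (['a','y'], past) c3 = (['a','y',c3], past) := by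
                    unfold aStep; simp [h3a]
                  rw [h3]
                  have hdead := deadLoop s3 ['a','y',c3] past (by simp)
                    (by simp [List.isPrefixOf, h3a]) (by simp [List.isPrefixOf])
                    (by simp [List.isPrefixOf]) (by simp [List.isPrefixOf])
                  simp [bOk, List.isPrefixOf, Ne.symm h3a, hdead]
            · have h2 : aStep (['a'], past) c2 = (['a', c2], past) := by
                unfold aStep; simp [h2y]
              rw [h2]
              have hdead := deadLoop s2 ['a', c2] past (by simp)
                (by simp [List.isPrefixOf, h2y]) (by simp [List.isPrefixOf])
                (by simp [List.isPrefixOf]) (by simp [List.isPrefixOf])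
              simp [bOk, List.isPrefixOf, Ne.symm h2y, hdead]
          · by_cases h1w : c1 = 'w'
            · subst h1w
              by_cases h2o : c2 = 'o'
              · subst h2o
                have h2 : aStep (['w'], past) 'o' = (['w','o'], past) := by
                  unfold aStep; simp
                rw [h2]
                match s2 with
                | [] => simp [bOk, List.isPrefixOf]
                | c3 :: s3 =>
                  simp only [List.foldl_cons]
                  have hlen3 : s3.length ≤ n := by simp at hlen; omega
                  by_cases h3o : c3 = 'o'
                  · subst h3o
                    have h3 : aStep (['w','o'], past) 'o' =
                        if past = ['w','o','o'] then (['w','o','o'], past)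
                        else ([], ['w','o','o']) := by
                      unfold aStep; simp
                    rw [h3]
                    by_cases hp : past = ['w','o','o']
                    · subst hp
                      have hstuck := wordStuck s3 ['w','o','o'] ['w','o','o'] (by simp)
                      simp [bOk, List.isPrefixOf, hstuck]
                    · rw [if_neg hp]
                      have hIH := ih s3 ['w','o','o'] hlen3
                      simp [bOk, List.isPrefixOf, hp, hIH]
                  · have h3 : aStep (['w','o'], past) c3 = (['w','o',c3], past) := by
                      unfold aStep; simp [h3o]
                    rw [h3]
                    have hdead := deadLoop s3 ['w','o',c3] past (by simp)
                      (by simp [List.isPrefixOf]) (by simp [List.isPrefixOf])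
                      (by simp [List.isPrefixOf, h3o]) (by simp [List.isPrefixOf])
                    simp [bOk, List.isPrefixOf, Ne.symm h3o, hdead]
              · have h2 : aStep (['w'], past) c2 = (['w', c2], past) := by
                  unfold aStep; simp [h2o]
                rw [h2]
                have hdead := deadLoop s2 ['w', c2] past (by simp)
                  (by simp [List.isPrefixOf]) (by simp [List.isPrefixOf])
                  (by simp [List.isPrefixOf, h2o]) (by simp [List.isPrefixOf])
                simp [bOk, List.isPrefixOf, Ne.symm h2o, hdead]
            · have h2' : aStep ([c1], past) c2 = ([c1, c2], past) := by
                unfold aStep; simp [h1y, h1m, h1a, h1w]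
              rw [h2']
              have hdead := deadLoop s2 [c1, c2] past (by simp)
                (by simp [List.isPrefixOf, h1a]) (by simp [List.isPrefixOf, h1y])
                (by simp [List.isPrefixOf, h1w]) (by simp [List.isPrefixOf, h1m])
              simp [bOk, List.isPrefixOf, Ne.symm h1y, Ne.symm h1m, Ne.symm h1a, Ne.symm h1w, hdead]

theorem main_lemma (s : List Char) : ∀ (past : List Char),
    ((s.foldl aStep ([], past)).1 = []) ↔ (bOk s past = true) := by
  intro past; exact mainAux s.length s past le_rfl

theorem solution_spec : Claim_equal_solution := by
  intro babbling _
  unfold Spec_solution solution solution_alt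
  have key : ∀ (l : List String) (acc : Int),
      (l.foldl (fun answer bab =>
        let sp := bab.toList.foldl aStep ([], [])
        if sp.1 = [] then answer + 1 else answer) acc)
      = l.foldl (fun acc b => acc + (if bOk b.toList [] then 1 else 0)) acc := by
    intro l
    induction l with
    | nil => intro acc; rfl
    | cons b l ihl =>
      intro acc
      simp only [List.foldl_cons]
      rw [ihl]
      congr 1
      by_cases hb : bOk b.toList [] = true
      · simp [(main_lemma b.toList []).2 hb, hb]
      · have hA : ¬ (b.toList.foldl aStep ([], [])).1 = [] :=
          fun h => hb ((main_lemma b.toList []).1 h)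
        simp [hA, hb]
  exact key babbling 0
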